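-- pv_equiv track=rewrite | github.com/BathroomEpiphanies/adventofcode_2023 | 18/solution.py | integrate_trench
-- ===== SOURCE A (Python) =====
-- def integrate_trench(dig_instructions:list[tuple[str,int]]):
--     # The enclosed area is the integral under segments going to the right, minus
--     # segments going left. Half of the border length lies outside the center
--     # line of the circumference, and needs to be added. Circumference is always
--     # even since equal steps needs to be taken left/right and down/up There are
--     # also 4 more convex corners than concave corners, this adds another 1.
--     height = 0
--     circumference = 0
--     integral = 0
--     for direction,length in dig_instructions:
--         circumference += length
--         if direction == 'R':
--             integral += length*height
--         if direction == 'L':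
--             integral -= length*height
--         if direction == 'U':
--             height += length
--         if direction == 'D':
--             height -= length
--     return integral+circumference//2+1
-- ===== SOURCE B (Python) =====
-- def integrate_trench(dig_instructions: list[tuple[str, int]]):
--     # Build the polygon as an explicit list of vertices, then measure it
--     # in a second pass: shoelace integral as sum of y*dx over the segments
--     # (A likewise omits the closing segment, which is 0 for a closed trench).
--     x = y = 0
--     perimeter = 0
--     verts = [(0, 0)]
--     for direction, length in dig_instructions:
--         perimeter += length
--         if direction == 'R':
--             x += length
--         elif direction == 'L':
--             x -= length
--         elif direction == 'U':
--             y += length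
--         elif direction == 'D':
--             y -= length
--         verts.append((x, y))
--     integral = sum(v[1] * (w[0] - v[0]) for v, w in zip(verts, verts[1:]))
--     return integral + perimeter // 2 + 1
-- ===== Notes on version B (the rewrite author's own statement) =====
-- stated objective: alternative
-- what changed: B builds the trench polygon as an explicit vertex list in one pass and then computes the shoelace integral (sum of y*dx over consecutive vertex pairs) in a separate second pass, instead of A's single fused loop carrying a running height and integral.
import Mathlib
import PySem

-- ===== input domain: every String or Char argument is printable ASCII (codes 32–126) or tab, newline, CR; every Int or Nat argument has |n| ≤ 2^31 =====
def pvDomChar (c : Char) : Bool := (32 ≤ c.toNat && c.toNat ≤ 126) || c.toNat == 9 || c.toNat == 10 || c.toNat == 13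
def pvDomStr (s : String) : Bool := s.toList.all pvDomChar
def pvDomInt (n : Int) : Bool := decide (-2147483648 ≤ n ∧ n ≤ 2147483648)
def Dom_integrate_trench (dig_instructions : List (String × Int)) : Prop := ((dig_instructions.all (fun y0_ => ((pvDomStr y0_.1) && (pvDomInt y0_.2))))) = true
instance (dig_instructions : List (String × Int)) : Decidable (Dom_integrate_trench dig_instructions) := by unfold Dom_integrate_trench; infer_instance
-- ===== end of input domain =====

-- B builds the trench polygon as an explicit vertex list, then computes the shoelace
-- integral (sum of y*dx over consecutive vertices) in a separate second pass,
-- instead of A's single fused loop; objective: alternative decomposition, same cost.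


-- ===== PORT A =====
-- loop body of A: state (height, circumference, integral), branches in A's order
def pvBodyA (st : Int × Int × Int) (di : String × Int) : Int × Int × Int :=
  let (height, circumference, integral) := st
  let (direction, length) := di
  let circumference := circumference + length
  let integral := if direction == "R" then integral + length * height else integral
  let integral := if direction == "L" then integral - length * height else integral
  let height := if direction == "U" then height + length else height
  let height := if direction == "D" then height - length else height
  (height, circumference, integral)

def integrate_trench (dig_instructions : List (String × Int)) : Int :=
  let st := dig_instructions.foldl pvBodyA (0, 0, 0)
  st.2.2 + PySem.Int.floordiv st.2.1 2 + 1

-- ===== PORT B =====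
-- loop body of B: state (x, y, perimeter, vertex list), appending each new vertex
def pvBodyB (st : Int × Int × Int × List (Int × Int)) (di : String × Int) :
    Int × Int × Int × List (Int × Int) :=
  let (x, y, perimeter, verts) := st
  let (direction, length) := di
  let perimeter := perimeter + length
  let x := if direction == "R" then x + length
           else if direction == "L" then x - length else x
  let y := if direction == "U" then y + length
           else if direction == "D" then y - length else y
  (x, y, perimeter, verts ++ [(x, y)])

def integrate_trench_alt (dig_instructions : List (String × Int)) : Int :=
  let st := dig_instructions.foldl pvBodyB (0, 0, 0, [(0, 0)])
  let verts := st.2.2.2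
  let integral := (verts.zip verts.tail).foldl
    (fun acc vw => acc + vw.1.2 * (vw.2.1 - vw.1.1)) 0
  integral + PySem.Int.floordiv st.2.2.1 2 + 1

-- ===== PRECONDITION & SPEC =====
def Spec_integrate_trench (dig_instructions : List (String × Int)) (out : Int) : Prop := out = integrate_trench_alt dig_instructions
instance (dig_instructions : List (String × Int)) (out : Int) : Decidable (Spec_integrate_trench dig_instructions out) := by unfold Spec_integrate_trench; infer_instance

-- ===== CLAIM (what is proved, stated in full; the proofs are below) =====
def Claim_equal_integrate_trench : Prop := ∀ (dig_instructions : List (String × Int)), Dom_integrate_trench dig_instructions → Spec_integrate_trench dig_instructions (integrate_trench dig_instructions)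

-- ===== LEMMAS AND PROOFS =====

-- proof helpers: final height, total length, A's integral, B's vertex chain
def pvHFin : List (String × Int) → Int → Int
  | [], h => h
  | (d, l) :: r, h =>
      pvHFin r (let h1 := if d == "U" then h + l else h;
                if d == "D" then h1 - l else h1)

def pvLenSum : List (String × Int) → Int
  | [] => 0
  | (_, l) :: r => l + pvLenSum r

def pvAInt : List (String × Int) → Int → Int
  | [], _ => 0
  | (d, l) :: r, h =>
      (if d == "R" then l * h else 0) + (if d == "L" then -(l * h) else 0)
        + pvAInt r (let h1 := if d == "U" then h + l else h;
                    if d == "D" then h1 - l else h1)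

def pvChain : List (String × Int) → Int → Int → List (Int × Int)
  | [], _, _ => []
  | (d, l) :: r, x, y =>
      let x' := if d == "R" then x + l else if d == "L" then x - l else x
      let y' := if d == "U" then y + l else if d == "D" then y - l else y
      (x', y') :: pvChain r x' y'

def pvZS : List (Int × Int) → Int
  | [] => 0
  | [_] => 0
  | v :: w :: r => v.2 * (w.1 - v.1) + pvZS (w :: r)

lemma foldA_spec (l : List (String × Int)) : ∀ h c i,
    l.foldl pvBodyA (h, c, i) = (pvHFin l h, c + pvLenSum l, i + pvAInt l h) := by
  induction l with
  | nil => intro h c i; simp [pvHFin, pvLenSum, pvAInt]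
  | cons di r ih =>
      rcases di with ⟨d, len⟩
      intro h c i
      simp only [List.foldl_cons, pvBodyA, ih, pvHFin, pvLenSum, pvAInt]
      refine Prod.ext rfl (Prod.ext (by ring) ?_)
      split_ifs <;> ring

lemma foldB_spec (l : List (String × Int)) : ∀ x y p vs,
    (l.foldl pvBodyB (x, y, p, vs)).2.2 = (p + pvLenSum l, vs ++ pvChain l x y) := by
  induction l with
  | nil => intro x y p vs; simp [pvChain, pvLenSum]
  | cons di r ih =>
      rcases di with ⟨d, len⟩
      intro x y p vs
      simp only [List.foldl_cons, pvBodyB, ih, pvChain, pvLenSum]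
      refine Prod.ext (by ring) (by simp)

lemma zipfold_eq_zs (vs : List (Int × Int)) : ∀ a,
    (vs.zip vs.tail).foldl (fun acc vw => acc + vw.1.2 * (vw.2.1 - vw.1.1)) a
      = a + pvZS vs := by
  induction vs with
  | nil => intro a; simp [pvZS]
  | cons v r ih =>
      intro a
      cases r with
      | nil => simp [pvZS]
      | cons w r' =>
          simp only [List.tail_cons, List.zip_cons_cons, List.foldl_cons]
          have h := ih (a + v.2 * (w.1 - v.1))
          simp only [List.tail_cons] at h
          rw [h]
          simp only [pvZS]
          ring

lemma zs_chain (l : List (String × Int)) : ∀ x y,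
    pvZS ((x, y) :: pvChain l x y) = pvAInt l y := by
  induction l with
  | nil => intro x y; simp [pvChain, pvZS, pvAInt]
  | cons di r ih =>
      rcases di with ⟨d, len⟩
      intro x y
      simp only [pvChain, pvZS, pvAInt, ih]
      split_ifs with h1 h2 h3 h4 <;> simp_all <;> ring

-- ===== VERDICT (by name: the statement is the Claim_ definition above) =====
theorem integrate_trench_spec : Claim_equal_integrate_trench := by
  intro l _
  unfold Spec_integrate_trench integrate_trench integrate_trench_alt
  simp only [foldA_spec, foldB_spec, List.singleton_append, zipfold_eq_zs]
  have hzs : pvZS ((0, 0) :: pvChain l 0 0) = pvAInt l 0 := zs_chain l 0 0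
  simp [hzs]
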